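-- pv_equiv track=rewrite | github.com/middle-finger-labs/forge | integrations/issue_tracker.py | _priority_weight
-- ===== SOURCE A (Python) =====
-- _PRIORITY_WEIGHT: dict[str, int] = {
--     "critical": 40,
--     "p0": 40,
--     "urgent": 40,
--     "high": 30,
--     "p1": 30,
--     "medium": 20,
--     "p2": 20,
--     "low": 10,
--     "p3": 10,
-- }
--
-- def _priority_weight(labels: list[str]) -> int:
--     """Return the highest priority weight found in *labels*."""
--     best = 0
--     for label in labels:
--         lower = label.lower()
--         for keyword, weight in _PRIORITY_WEIGHT.items():
--             if keyword in lower: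
--                 best = max(best, weight)
--     return best
-- ===== SOURCE B (Python) =====
-- _TIERS = (
--     (40, ("critical", "p0", "urgent")),
--     (30, ("high", "p1")),
--     (20, ("medium", "p2")),
--     (10, ("low", "p3")),
-- )
--
-- def _priority_weight(labels):
--     """Return the highest priority weight found in *labels*."""
--     lowers = [label.lower() for label in labels]
--     for weight, keywords in _TIERS:
--         if any(kw in lo for lo in lowers for kw in keywords):
--             return weight
--     return 0
-- ===== Notes on version B (the rewrite author's own statement) =====
-- stated objective: alternative
-- what changed: Replaces the label-first double loop with a running max by a tier-first scan: keywords are grouped into descending weight tiers, labels are lowercased once up front, and the first tier with any substring hit is returned immediately (0 if none).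
import Mathlib
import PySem

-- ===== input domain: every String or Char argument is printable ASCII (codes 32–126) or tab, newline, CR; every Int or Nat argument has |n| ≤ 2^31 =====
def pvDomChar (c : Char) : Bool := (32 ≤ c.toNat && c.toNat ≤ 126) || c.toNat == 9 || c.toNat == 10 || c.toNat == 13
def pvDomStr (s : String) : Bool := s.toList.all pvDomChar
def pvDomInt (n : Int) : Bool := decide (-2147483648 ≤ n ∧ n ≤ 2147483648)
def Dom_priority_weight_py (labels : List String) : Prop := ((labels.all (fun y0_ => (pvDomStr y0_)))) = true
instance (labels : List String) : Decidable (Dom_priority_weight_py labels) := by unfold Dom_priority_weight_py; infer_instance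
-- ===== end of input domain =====

-- B replaces A's label-first double loop with a running max by a tier-first scan over
-- descending weight groups of keywords, lowercasing each label once and returning the
-- first matching tier (objective: alternative decomposition, same cost).

-- ===== PORT A =====
-- the module-level dict _PRIORITY_WEIGHT
def pwDict : PySem.Dict String Int :=
  PySem.Dict.ofList
    [("critical", 40), ("p0", 40), ("urgent", 40), ("high", 30), ("p1", 30),
     ("medium", 20), ("p2", 20), ("low", 10), ("p3", 10)]

def priority_weight_py (labels : List String) : Int :=
  labels.foldl
    (fun best label =>
      let lower := PySem.Str.lower label
      pwDict.items.foldl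
        (fun best kw => if PySem.Str.isIn kw.1 lower then max best kw.2 else best)
        best)
    0

-- ===== PORT B =====
-- the module-level tuple _TIERS
def pwTiers : List (Int × List String) :=
  [(40, ["critical", "p0", "urgent"]), (30, ["high", "p1"]),
   (20, ["medium", "p2"]), (10, ["low", "p3"])]

-- Source B's for-loop over tiers with its early return
def pwScan (lowers : List String) : List (Int × List String) → Int
  | [] => 0
  | (weight, keywords) :: rest =>
      if lowers.any (fun lo => keywords.any (fun kw => PySem.Str.isIn kw lo)) then weight
      else pwScan lowers rest

def priority_weight_py_alt (labels : List String) : Int :=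
  pwScan (labels.map (fun label => PySem.Str.lower label)) pwTiers

-- ===== PRECONDITION & SPEC =====
def Spec_priority_weight_py (labels : List String) (out : Int) : Prop := out = priority_weight_py_alt labels
instance (labels : List String) (out : Int) : Decidable (Spec_priority_weight_py labels out) := by unfold Spec_priority_weight_py; infer_instance

-- ===== CLAIM (what is proved, stated in full; the proofs are below) =====
def Claim_equal_priority_weight_py : Prop := ∀ (labels : List String), Dom_priority_weight_py labels → Spec_priority_weight_py labels (priority_weight_py labels)

-- ===== LEMMAS AND PROOFS =====

-- the weight A's inner loop assigns to one (already lowercased) label, in grouped form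
def pwScore (lo : String) : Int :=
  if PySem.Str.isIn "critical" lo || PySem.Str.isIn "p0" lo || PySem.Str.isIn "urgent" lo then 40
  else if PySem.Str.isIn "high" lo || PySem.Str.isIn "p1" lo then 30
  else if PySem.Str.isIn "medium" lo || PySem.Str.isIn "p2" lo then 20
  else if PySem.Str.isIn "low" lo || PySem.Str.isIn "p3" lo then 10
  else 0

theorem pwItems_eq :
    pwDict.items =
      [("critical", (40:Int)), ("p0", 40), ("urgent", 40), ("high", 30), ("p1", 30),
       ("medium", 20), ("p2", 20), ("low", 10), ("p3", 10)] := by decide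

-- A's inner fold started from b equals max b (the same fold from 0), given nonneg weights
theorem pwInner_shift (pairs : List (String × Int)) (lo : String) :
    ∀ b : Int, 0 ≤ b → (∀ p ∈ pairs, (0:Int) ≤ p.2) →
      pairs.foldl (fun best kw => if PySem.Str.isIn kw.1 lo then max best kw.2 else best) b
        = max b (pairs.foldl (fun best kw => if PySem.Str.isIn kw.1 lo then max best kw.2 else best) 0) := by
  induction pairs with
  | nil => intro b hb _; simp [List.foldl]; omega
  | cons p rest ih =>
      intro b hb hw
      have hw2 : (0:Int) ≤ p.2 := hw p (List.mem_cons_self ..)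
      have hrest : ∀ q ∈ rest, (0:Int) ≤ q.2 := fun q hq => hw q (List.mem_cons_of_mem _ hq)
      simp only [List.foldl]
      by_cases hm : PySem.Str.isIn p.1 lo
      · rw [if_pos hm, if_pos hm,
          ih (max b p.2) (le_trans hw2 (le_max_right _ _)) hrest,
          ih (max 0 p.2) (le_trans hw2 (le_max_right _ _)) hrest]
        omega
      · rw [if_neg hm, if_neg hm, ih b hb hrest]

-- A's inner fold over the literal dict items, from 0, is the grouped tier chain
theorem pwInner_zero (lo : String) :
    pwDict.items.foldl (fun best kw => if PySem.Str.isIn kw.1 lo then max best kw.2 else best) 0 = pwScore lo := by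
  rw [pwItems_eq]
  simp only [List.foldl, pwScore]
  generalize PySem.Str.isIn "critical" lo = b1
  generalize PySem.Str.isIn "p0" lo = b2
  generalize PySem.Str.isIn "urgent" lo = b3
  generalize PySem.Str.isIn "high" lo = b4
  generalize PySem.Str.isIn "p1" lo = b5
  generalize PySem.Str.isIn "medium" lo = b6
  generalize PySem.Str.isIn "p2" lo = b7
  generalize PySem.Str.isIn "low" lo = b8
  generalize PySem.Str.isIn "p3" lo = b9
  revert b1 b2 b3 b4 b5 b6 b7 b8 b9
  decide

theorem pwMaxChain : ∀ (b1 b2 b3 b4 b5 b6 b7 b8 b9 c1 c2 c3 c4 : Bool),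
    (if b1 || (b2 || (b3 || c1)) then (40:Int) else if b4 || (b5 || c2) then 30
      else if b6 || (b7 || c3) then 20 else if b8 || (b9 || c4) then 10 else 0)
    = max (if b1 || (b2 || b3) then 40 else if b4 || b5 then 30
            else if b6 || b7 then 20 else if b8 || b9 then 10 else 0)
          (if c1 then 40 else if c2 then 30 else if c3 then 20 else if c4 then 10 else 0) := by decide

theorem pwScan_nil : pwScan [] pwTiers = 0 := by decide

theorem pwScan_cons (lo : String) (lows : List String) :
    pwScan (lo :: lows) pwTiers = max (pwScore lo) (pwScan lows pwTiers) := by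
  simp only [pwScan, pwTiers, pwScore, List.any_cons, List.any_nil, Bool.or_false, Bool.or_assoc]
  exact pwMaxChain _ _ _ _ _ _ _ _ _ _ _ _ _

theorem pwScore_nonneg (lo : String) : 0 ≤ pwScore lo := by
  unfold pwScore; split_ifs <;> norm_num

theorem pwScan_nonneg (lows : List String) : 0 ≤ pwScan lows pwTiers := by
  induction lows with
  | nil => rw [pwScan_nil]
  | cons lo rest ih =>
      rw [pwScan_cons]
      exact le_trans ih (le_max_right _ _)

-- the main loop invariant: A's outer fold from b is max b (B's tier scan of the rest)
theorem pwMain (labels : List String) : ∀ b : Int, 0 ≤ b →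
    labels.foldl
      (fun best label =>
        let lower := PySem.Str.lower label
        pwDict.items.foldl
          (fun best kw => if PySem.Str.isIn kw.1 lower then max best kw.2 else best)
          best)
      b
    = max b (pwScan (labels.map (fun label => PySem.Str.lower label)) pwTiers) := by
  induction labels with
  | nil =>
      intro b hb
      simp only [List.foldl, List.map_nil, pwScan_nil]
      omega
  | cons l ls ih =>
      intro b hb
      have hitems : ∀ p ∈ pwDict.items, (0:Int) ≤ p.2 := by
        rw [pwItems_eq]; intro p hp; fin_cases hp <;> norm_num
      simp only [List.foldl, List.map_cons]
      rw [pwInner_shift pwDict.items (PySem.Str.lower l) b hb hitems,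
        pwInner_zero (PySem.Str.lower l),
        ih (max b (pwScore (PySem.Str.lower l)))
          (le_trans (pwScore_nonneg _) (le_max_right _ _)),
        pwScan_cons, max_assoc]

-- ===== VERDICT (by name: the statement is the Claim_ definition above) =====
theorem priority_weight_py_spec : Claim_equal_priority_weight_py := by
  intro labels _
  unfold Spec_priority_weight_py priority_weight_py priority_weight_py_alt
  rw [pwMain labels 0 le_rfl]
  exact max_eq_right (pwScan_nonneg _)
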